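-- pv_equiv track=rewrite | github.com/MJmaolu/DVGfinder | ExternalNeeds/thirdPrograms/ViReMa_0.23/Compiler_Module.py | ContractX
-- ===== SOURCE A (Python) =====
-- def ContractX(x):
--     while 'Mismatch' in x:
--         y = x.index('Mismatch')
--         newx= x[:y-2]
--         newx[-1] += x[y-1].split("_")[1]
--         newx[-1]+= x[y+3]
--         newx += x[y+4:]
--         x = newx
--     while 'Sub' in x:
--         y = x.index('Sub')
--         newx= x[:y-2]
--         newx[-1] += x[y-1].split("_")[1]
--         newx[-1]+= x[y+3]
--         newx += x[y+4:]
--         x = newx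
--     return x
-- ===== SOURCE B (Python) =====
-- def ContractX(x):
--     out = []
--     i = 0
--     while i < len(x):
--         tok = x[i]
--         if tok == 'Mismatch' or tok == 'Sub':
--             v = out.pop()
--             out.pop()
--             out[-1] += v.split("_")[1] + x[i + 3]
--             i += 4
--         else:
--             out.append(tok)
--             i += 1
--     return out
-- ===== Notes on version B (the rewrite author's own statement) =====
-- stated objective: alternative
-- what changed: Replaces A's two repeated scan-index-and-rebuild while loops (one whole pass per remaining marker, rebuilding the list each time) by one left-to-right pass over the tokens that keeps an output stack and performs each 'Mismatch'/'Sub' merge incrementally; same results, different traversal (single pass, no repeated index scans).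
-- outside the precondition, e.g. on ContractX(['_', 'Sub', '_', 'Mismatch', 'b_c', 't', '_']): A returns ['__'], B raises IndexError; on ContractX(['a', 'Sub', 'b_c', 'Mismatch', 'Mismatch', 'MX', '']): A returns ['ac'], B raises IndexError
import Mathlib
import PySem

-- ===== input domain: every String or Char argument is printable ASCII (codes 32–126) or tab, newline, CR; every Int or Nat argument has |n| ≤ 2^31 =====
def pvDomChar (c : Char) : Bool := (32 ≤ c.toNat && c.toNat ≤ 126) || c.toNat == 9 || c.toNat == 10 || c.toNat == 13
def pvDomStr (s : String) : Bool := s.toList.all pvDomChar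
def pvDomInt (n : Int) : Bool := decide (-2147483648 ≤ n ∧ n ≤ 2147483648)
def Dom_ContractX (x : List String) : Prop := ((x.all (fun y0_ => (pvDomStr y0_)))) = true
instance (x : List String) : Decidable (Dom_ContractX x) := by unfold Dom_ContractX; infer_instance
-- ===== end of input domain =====

-- B replaces A's repeated scan-index-and-rebuild loops by a single left-to-right stack pass (alternative algorithm, same values).

-- ===== PORT A =====
-- one merge step of A's loop body (both loops share it); Python raising spots
-- (newx[-1] on empty, split("_")[1] missing, x[y+3] out of range) use a "" /
-- empty default here and are excluded by Pre_ContractX.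
def pvStep (x : List String) (y : Int) : List String :=
  let newx := PySem.List.slice x none (some (y - 2))
  let add1 := PySem.List.pyGetD (((PySem.Str.split? (PySem.List.pyGetD x (y - 1) "") "_").getD [])) 1 ""
  let add2 := PySem.List.pyGetD x (y + 3) ""
  (newx.dropLast ++ [PySem.List.pyGetD newx (-1) "" ++ add1 ++ add2]) ++ PySem.List.slice x (some (y + 4)) none

-- 'while tag in x: …'; fuel x.length is enough on Pre_ inputs (each iteration drops 6 tokens)
def pvLoop (tag : String) : Nat → List String → List String
  | 0, x => x
  | n + 1, x =>
    if tag ∈ x then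
      match PySem.List.index? x tag with
      | some y => pvLoop tag n (pvStep x (y : Int))
      | none => x
    else x

def ContractX (x : List String) : List String :=
  pvLoop "Sub" x.length (pvLoop "Mismatch" x.length x)

-- ===== PORT B =====
-- Source B's single pass; out is the stack with its top at the head (reversed at the end).
-- the impossible-stack/short-tail cases are Python raises, excluded by Pre_ContractX.
def pvGo : List String → List String → List String
  | out, [] => out.reverse
  | out, tok :: r =>
    if tok == "Mismatch" || tok == "Sub" then
      match out, r with
      | v :: _u :: p :: out', _w1 :: _w2 :: t :: r' =>
          pvGo ((p ++ PySem.List.pyGetD (((PySem.Str.split? v "_").getD [])) 1 "" ++ t) :: out') r'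
      | _, _ => out.reverse
    else pvGo (tok :: out) r

def ContractX_alt (x : List String) : List String := pvGo [] x

-- ===== PRECONDITION & SPEC =====
def pvOk (s : String) : Bool := !(s == "Mismatch" || s == "Sub")

-- split("_")[1] of a token, with "" where Python would raise (that raise is excluded by Pre_)
def pvMid (v : String) : String := PySem.List.pyGetD (((PySem.Str.split? v "_").getD [])) 1 ""

-- shape-and-safety check, one pass over the tokens. It carries the pair
-- (f, s) = (the fully merged token A's second loop builds here, the partially
-- merged token A's first loop builds here) and demands (i) every
-- 'Mismatch'/'Sub' marker sits in the 6-token context A's merge arithmetic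
-- assumes (a merge target two tokens before it, a '_'-bearing token at
-- marker-1, three tokens after it), and (ii) no context token and no (partially)
-- merged token itself spells 'Mismatch'/'Sub' (pvOk), so A's index scans only
-- ever hit real markers.
def pvWf : Option (String × String) → List String → Bool
  | _, [] => true
  | acc, u :: rest =>
    if rest[1]? == some "Mismatch" || rest[1]? == some "Sub" then
      match acc, rest with
      | some (f, s), v :: tok :: w1 :: w2 :: t :: rest' =>
          pvOk u && pvOk v && v.toList.contains '_' && pvOk w1 && pvOk w2 && pvOk t &&
          pvOk (f ++ pvMid v ++ t) &&
          (if tok == "Mismatch"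
           then pvOk (s ++ pvMid v ++ t) && pvWf (some (f ++ pvMid v ++ t, s ++ pvMid v ++ t)) rest'
           else pvWf (some (f ++ pvMid v ++ t, t)) rest')
      | _, _ => false
    else pvOk u && pvWf (some (u, u)) rest

-- Pre_ excludes inputs whose 'Mismatch'/'Sub' markers lack the 6-token context
-- A's merge arithmetic assumes (A raises there, loops forever, or returns
-- accidental values of its negative-index slice wraparound), and inputs where a
-- context token or a (partially) merged token itself spells 'Mismatch'/'Sub'
-- (a data token named like the marker: A re-merges it as if it were a marker,
-- B keeps it as data — both readings are defensible on such ambiguous input).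
def Pre_ContractX (x : List String) : Prop := pvWf none x = true
instance (x : List String) : Decidable (Pre_ContractX x) := by unfold Pre_ContractX; infer_instance

def pvWitness_ContractX : List String := ["ab", "u", "c_d", "Mismatch", "w", "z", "tail"]

def Spec_ContractX (x : List String) (out : List String) : Prop := out = ContractX_alt x
instance (x : List String) (out : List String) : Decidable (Spec_ContractX x out) := by unfold Spec_ContractX; infer_instance

-- ===== CLAIM (what is proved, stated in full; the proofs are below) =====
def Claim_equal_ContractX : Prop := ∀ (x : List String), Dom_ContractX x → Pre_ContractX x → Spec_ContractX x (ContractX x)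

-- ===== LEMMAS AND PROOFS =====

-- chunk view of a well-formed token list: a plain token, or a marker block
-- [u, v, marker, w1, w2, t] (m = true ↔ 'Mismatch')
inductive PvChunk where
  | plain : String → PvChunk
  | blk : Bool → String → String → String → String → String → PvChunk
deriving DecidableEq, Repr

def pvFlat : PvChunk → List String
  | .plain s => [s]
  | .blk m u v w1 w2 t => [u, v, if m then "Mismatch" else "Sub", w1, w2, t]

def pvFlats (cs : List PvChunk) : List String := (cs.map pvFlat).flatten

-- chunk-level image of pvWf, carrying the same (full, segment) accumulators
def pvCOK : Option (String × String) → List PvChunk → Bool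
  | _, [] => true
  | _, .plain str :: cs => pvOk str && pvCOK (some (str, str)) cs
  | none, .blk _ _ _ _ _ _ :: _ => false
  | some (f, s), .blk true u v w1 w2 t :: cs =>
      pvOk u && pvOk v && v.toList.contains '_' && pvOk w1 && pvOk w2 && pvOk t &&
      pvOk (f ++ pvMid v ++ t) && pvOk (s ++ pvMid v ++ t) &&
      pvCOK (some (f ++ pvMid v ++ t, s ++ pvMid v ++ t)) cs
  | some (f, s), .blk false u v w1 w2 t :: cs =>
      pvOk u && pvOk v && v.toList.contains '_' && pvOk w1 && pvOk w2 && pvOk t &&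
      pvOk (f ++ pvMid v ++ t) &&
      pvCOK (some (f ++ pvMid v ++ t, t)) cs

-- safety condition for A's second loop, over the 'Sub'-only chunks loop 1 leaves,
-- threading the full accumulator
def pvCOK2 : String → List PvChunk → Bool
  | _, [] => true
  | _, .plain str :: cs => pvOk str && pvCOK2 str cs
  | a, .blk false u v _w1 _w2 t :: cs =>
      pvOk u && pvOk v && pvOk (a ++ pvMid v ++ t) && pvCOK2 (a ++ pvMid v ++ t) cs
  | _, .blk true _ _ _ _ _ :: _ => false

def pvParse : List String → List PvChunk
  | [] => []
  | u :: rest =>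
    if rest[1]? == some "Mismatch" || rest[1]? == some "Sub" then
      match rest with
      | v :: tok :: w1 :: w2 :: t :: rest' => .blk (tok == "Mismatch") u v w1 w2 t :: pvParse rest'
      | _ => []
    else .plain u :: pvParse rest

-- the common semantics: fold the chunks, merging each block into the pending token
def pvMerge (acc : String) : List PvChunk → List String
  | [] => [acc]
  | .plain s :: cs => acc :: pvMerge s cs
  | .blk _ _ v _ _ t :: cs => pvMerge (acc ++ pvMid v ++ t) cs

-- result of A's first ('Mismatch') loop, at chunk level
def pvChunkM (acc : String) : List PvChunk → List PvChunk
  | [] => [.plain acc]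
  | .plain s :: cs => .plain acc :: pvChunkM s cs
  | .blk true _ v _ _ t :: cs => pvChunkM (acc ++ pvMid v ++ t) cs
  | .blk false u v w1 w2 t :: cs =>
      match pvChunkM t cs with
      | .plain t' :: rest => .plain acc :: .blk false u v w1 w2 t' :: rest
      | r => r

def pvCntM : List PvChunk → Nat
  | [] => 0
  | .blk true _ _ _ _ _ :: cs => pvCntM cs + 1
  | _ :: cs => pvCntM cs

def pvCntS : List PvChunk → Nat
  | [] => 0
  | .blk false _ _ _ _ _ :: cs => pvCntS cs + 1
  | _ :: cs => pvCntS cs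

lemma pv_empty_append (s : String) : "" ++ s = s := by
  simp

-- ---- parse ----
lemma pv_parse_ok_aux : ∀ (n : Nat) (l : List String), l.length ≤ n →
    ∀ (acc : Option (String × String)),
    pvWf acc l = true → pvCOK acc (pvParse l) = true ∧ l = pvFlats (pvParse l) := by
  intro n
  induction n with
  | zero =>
    intro l hl acc h
    have hnil : l = [] := by cases l <;> simp_all
    subst hnil
    simp [pvParse, pvCOK, pvFlats]
  | succ n ih =>
    intro l hl acc h
    match l with
    | [] => simp [pvParse, pvCOK, pvFlats]
    | u :: rest =>
      by_cases hc : (rest[1]? == some "Mismatch" || rest[1]? == some "Sub") = true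
      · match rest with
        | v :: tok :: w1 :: w2 :: t :: rest' =>
          simp only [pvParse, hc, if_true]
          match acc with
          | none =>
            exfalso
            have hg : tok = "Mismatch" ∨ tok = "Sub" := by simpa using hc
            rw [pvWf.eq_def] at h
            rcases hg with rfl | rfl <;> simp at h
          | some (f, s) =>
            rw [pvWf.eq_def] at h
            simp only [hc, if_true] at h
            have hrest : rest'.length ≤ n := by simp at hl; omega
            have htok : tok = "Mismatch" ∨ tok = "Sub" := by
              simp only [List.getElem?_cons_succ, List.getElem?_cons_zero] at hc
              rcases (by simpa using hc) with h | h
              · left; exact h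
              · right; exact h
            rcases htok with rfl | rfl
            · simp only [if_pos (by rfl : ("Mismatch" == "Mismatch") = true), Bool.and_eq_true] at h
              obtain ⟨⟨⟨⟨⟨⟨⟨h1, h2⟩, h3⟩, h4⟩, h5⟩, h6⟩, h7⟩, ⟨h8, h9⟩⟩ := h
              obtain ⟨hcok, hflat⟩ := ih rest' hrest _ h9
              have h3' : '_' ∈ v.toList := by simpa using h3
              constructor
              · simp [pvCOK, h1, h2, h3', h4, h5, h6, h7, h8, hcok]
              · simp [pvFlats, pvFlat]; simpa [pvFlats] using hflat
            · simp only [if_neg (by decide : ¬ (("Sub" == "Mismatch") = true)), Bool.and_eq_true] at h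
              obtain ⟨⟨⟨⟨⟨⟨⟨h1, h2⟩, h3⟩, h4⟩, h5⟩, h6⟩, h7⟩, h9⟩ := h
              obtain ⟨hcok, hflat⟩ := ih rest' hrest _ h9
              have h3' : '_' ∈ v.toList := by simpa using h3
              constructor
              · simp [pvCOK, h1, h2, h3', h4, h5, h6, h7, hcok]
              · simp [pvFlats, pvFlat]; simpa [pvFlats] using hflat
        | [] => simp at hc
        | [v] => simp at hc
        | [v, tok] =>
          exfalso
          have hg : tok = "Mismatch" ∨ tok = "Sub" := by simpa using hc
          rw [pvWf.eq_def] at h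
          rcases hg with rfl | rfl <;> rcases acc with _ | ⟨f, s⟩ <;> simp at h
        | [v, tok, w1] =>
          exfalso
          have hg : tok = "Mismatch" ∨ tok = "Sub" := by simpa using hc
          rw [pvWf.eq_def] at h
          rcases hg with rfl | rfl <;> rcases acc with _ | ⟨f, s⟩ <;> simp at h
        | [v, tok, w1, w2] =>
          exfalso
          have hg : tok = "Mismatch" ∨ tok = "Sub" := by simpa using hc
          rw [pvWf.eq_def] at h
          rcases hg with rfl | rfl <;> rcases acc with _ | ⟨f, s⟩ <;> simp at h
      · rw [pvWf.eq_def] at h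
        simp [hc] at h
        obtain ⟨h1, h2⟩ := h
        have hrest : rest.length ≤ n := by simp at hl; omega
        obtain ⟨hcok, hflat⟩ := ih rest hrest _ h2
        constructor
        · rw [pvParse.eq_def]
          simp [hc, pvCOK, h1, hcok]
        · rw [pvParse.eq_def]
          simp [hc, pvFlats, pvFlat]
          simpa [pvFlats] using hflat

lemma pv_parse_ok : ∀ (l : List String) (acc : Option (String × String)), pvWf acc l = true →
    pvCOK acc (pvParse l) = true ∧ l = pvFlats (pvParse l) := fun l =>
  pv_parse_ok_aux l.length l le_rfl

-- ---- B side ----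
lemma pv_ok_false {s : String} (h : pvOk s = true) : (s == "Mismatch" || s == "Sub") = false := by
  simpa [pvOk] using h

lemma pvGo_plain (out : List String) (s : String) (r : List String)
    (h : (s == "Mismatch" || s == "Sub") = false) : pvGo out (s :: r) = pvGo (s :: out) r := by
  rw [pvGo.eq_def]
  simp [h]

lemma pvGo_tok (tok v u p : String) (out' : List String) (w1 w2 t : String) (r' : List String)
    (h : (tok == "Mismatch" || tok == "Sub") = true) :
    pvGo (v :: u :: p :: out') (tok :: w1 :: w2 :: t :: r')
      = pvGo ((p ++ PySem.List.pyGetD ((PySem.Str.split? v "_").getD []) 1 "" ++ t) :: out') r' := by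
  rw [pvGo.eq_def]
  simp [h]

lemma pv_go_merge : ∀ (cs : List PvChunk) (f s : String) (out : List String),
    pvCOK (some (f, s)) cs = true → pvOk f = true →
    pvGo (f :: out) (pvFlats cs) = out.reverse ++ pvMerge f cs := by
  intro cs
  induction cs with
  | nil =>
    intro f s out h ho
    simp [pvFlats, pvGo, pvMerge]
  | cons c cs ih =>
    intro f s out h ho
    cases c with
    | plain str =>
      simp only [pvCOK, Bool.and_eq_true] at h
      obtain ⟨h1, h2⟩ := h
      have hfl : pvFlats (.plain str :: cs) = str :: pvFlats cs := by simp [pvFlats, pvFlat]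
      rw [hfl]
      rw [pvGo_plain _ _ _ (pv_ok_false h1)]
      rw [ih str str (f :: out) h2 h1]
      simp [pvMerge]
    | blk m u v w1 w2 t =>
      cases m with
      | true =>
        simp only [pvCOK, Bool.and_eq_true] at h
        obtain ⟨⟨⟨⟨⟨⟨⟨⟨h1, h2⟩, h3⟩, h4⟩, h5⟩, h6⟩, h7⟩, h8⟩, h9⟩ := h
        have hfl : pvFlats (.blk true u v w1 w2 t :: cs)
            = u :: v :: "Mismatch" :: w1 :: w2 :: t :: pvFlats cs := by simp [pvFlats, pvFlat]
        rw [hfl]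
        rw [pvGo_plain _ _ _ (pv_ok_false h1), pvGo_plain _ _ _ (pv_ok_false h2),
          pvGo_tok _ _ _ _ _ _ _ _ _ (by decide)]
        rw [show (f ++ PySem.List.pyGetD ((PySem.Str.split? v "_").getD []) 1 "" ++ t)
              = f ++ pvMid v ++ t from rfl]
        rw [ih (f ++ pvMid v ++ t) (s ++ pvMid v ++ t) out h9 h7]
        simp [pvMerge]
      | false =>
        simp only [pvCOK, Bool.and_eq_true] at h
        obtain ⟨⟨⟨⟨⟨⟨⟨h1, h2⟩, h3⟩, h4⟩, h5⟩, h6⟩, h7⟩, h9⟩ := h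
        have hfl : pvFlats (.blk false u v w1 w2 t :: cs)
            = u :: v :: "Sub" :: w1 :: w2 :: t :: pvFlats cs := by simp [pvFlats, pvFlat]
        rw [hfl]
        rw [pvGo_plain _ _ _ (pv_ok_false h1), pvGo_plain _ _ _ (pv_ok_false h2),
          pvGo_tok _ _ _ _ _ _ _ _ _ (by decide)]
        rw [show (f ++ PySem.List.pyGetD ((PySem.Str.split? v "_").getD []) 1 "" ++ t)
              = f ++ pvMid v ++ t from rfl]
        rw [ih (f ++ pvMid v ++ t) t out h9 h7]
        simp [pvMerge]

-- ---- A side: one step ----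
lemma pv_index_eq (P : List String) (acc u v tg : String) (l : List String)
    (hP : tg ∉ P) (ha : acc ≠ tg) (hu : u ≠ tg) (hv : v ≠ tg) :
    PySem.List.index? (P ++ acc :: u :: v :: tg :: l) tg = some (P.length + 3) := by
  rw [PySem.List.index?_eq_some_iff]
  refine ⟨P ++ [acc, u, v], l, ?_, ?_, ?_⟩
  · simp
  · simp
  · simp only [List.mem_append, List.mem_cons, List.not_mem_nil, or_false]
    rintro (h | h | h | h)
    · exact hP h
    · exact ha h.symm
    · exact hu h.symm
    · exact hv h.symm

lemma pv_step_eq (P R : List String) (acc u v tg w1 w2 t : String) :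
    pvStep (P ++ acc :: u :: v :: tg :: w1 :: w2 :: t :: R) ((P.length : Int) + 3)
      = P ++ (acc ++ pvMid v ++ t) :: R := by
  have e1 : (P.length : Int) + 3 - 2 = ((P.length + 1 : Nat) : Int) := by push_cast; ring
  have e2 : (P.length : Int) + 3 - 1 = ((P.length + 2 : Nat) : Int) := by push_cast; ring
  have e3 : (P.length : Int) + 3 + 3 = ((P.length + 6 : Nat) : Int) := by push_cast; ring
  have e4 : (P.length : Int) + 3 + 4 = ((P.length + 7 : Nat) : Int) := by push_cast; ring
  unfold pvStep
  rw [e1, e2, e3, e4, PySem.List.slice_to_natCast, PySem.List.slice_from_natCast]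
  simp only [PySem.List.pyGetD_natCast]
  have htake : (P ++ acc :: u :: v :: tg :: w1 :: w2 :: t :: R).take (P.length + 1)
      = P ++ [acc] := by rw [List.take_append]; simp
  have hv' : (P ++ acc :: u :: v :: tg :: w1 :: w2 :: t :: R).getD (P.length + 2) "" = v := by
    simp [List.getD]
  have ht' : (P ++ acc :: u :: v :: tg :: w1 :: w2 :: t :: R).getD (P.length + 6) "" = t := by
    simp [List.getD]
  have hdrop : (P ++ acc :: u :: v :: tg :: w1 :: w2 :: t :: R).drop (P.length + 7) = R := by
    rw [List.drop_append]; simp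
  rw [htake, hv', ht', hdrop, PySem.List.pyGetD_neg_one_append_singleton, List.dropLast_concat]
  simp [pvMid]

lemma pv_loop_not_mem (tag : String) (n : Nat) (x : List String) (h : tag ∉ x) :
    pvLoop tag n x = x := by
  cases n <;> simp [pvLoop, h]

-- ---- facts about pvOk ----
lemma pv_ok_neM {s : String} (h : pvOk s = true) : s ≠ "Mismatch" := by
  intro hs; subst hs; simp [pvOk] at h

lemma pv_ok_neS {s : String} (h : pvOk s = true) : s ≠ "Sub" := by
  intro hs; subst hs; simp [pvOk] at h

-- ---- pvChunkM structure ----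
lemma pv_chunkM_head : ∀ (cs : List PvChunk) (acc : String),
    ∃ q r, pvChunkM acc cs = .plain (acc ++ q) :: r := by
  intro cs
  induction cs with
  | nil => intro acc; exact ⟨"", [], by simp [pvChunkM]⟩
  | cons c cs ih =>
    intro acc
    cases c with
    | plain s => exact ⟨"", pvChunkM s cs, by simp [pvChunkM]⟩
    | blk m u v w1 w2 t =>
      cases m with
      | true =>
        obtain ⟨q, r, hq⟩ := ih (acc ++ pvMid v ++ t)
        exact ⟨pvMid v ++ t ++ q, r, by
          simp only [pvChunkM]; rw [hq]; simp [String.append_assoc]⟩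
      | false =>
        obtain ⟨q, r, hq⟩ := ih t
        exact ⟨"", .blk false u v w1 w2 (t ++ q) :: r, by simp [pvChunkM, hq]⟩

-- the central structure lemma: on safe chunks, loop 1's chunk image has a plain
-- head extending the segment accumulator, and the rest is loop-2-safe with the
-- full accumulator continuing the merged head
lemma pv_chunkM_struct : ∀ (cs : List PvChunk) (f s : String),
    pvCOK (some (f, s)) cs = true → pvOk s = true → pvOk f = true →
    ∃ q r, pvChunkM s cs = .plain (s ++ q) :: r ∧ pvOk (s ++ q) = true ∧
      pvOk (f ++ q) = true ∧ pvCOK2 (f ++ q) r = true := by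
  intro cs
  induction cs with
  | nil =>
    intro f s h hs hf
    exact ⟨"", [], by simp [pvChunkM], by simpa using hs, by simpa using hf, by simp [pvCOK2]⟩
  | cons c cs ih =>
    intro f s h hs hf
    cases c with
    | plain str =>
      simp only [pvCOK, Bool.and_eq_true] at h
      obtain ⟨h1, h2⟩ := h
      obtain ⟨q2, r2, hq2, hok2, hfq2, hcok2⟩ := ih str str h2 h1 h1
      refine ⟨"", pvChunkM str cs, by simp [pvChunkM], by simpa using hs, by simpa using hf, ?_⟩
      rw [hq2]
      simp only [pvCOK2, Bool.and_eq_true]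
      exact ⟨hok2, hcok2⟩
    | blk m u v w1 w2 t =>
      cases m with
      | true =>
        simp only [pvCOK, Bool.and_eq_true] at h
        obtain ⟨⟨⟨⟨⟨⟨⟨⟨h1, h2⟩, h3⟩, h4⟩, h5⟩, h6⟩, h7⟩, h8⟩, h9⟩ := h
        obtain ⟨q', r', hq', hok', hfq', hcok'⟩ := ih (f ++ pvMid v ++ t) (s ++ pvMid v ++ t) h9 h8 h7
        refine ⟨pvMid v ++ t ++ q', r', ?_, ?_, ?_, ?_⟩
        · simp only [pvChunkM]; rw [hq']; simp [String.append_assoc]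
        · simpa [String.append_assoc] using hok'
        · simpa [String.append_assoc] using hfq'
        · simpa [String.append_assoc] using hcok'
      | false =>
        simp only [pvCOK, Bool.and_eq_true] at h
        obtain ⟨⟨⟨⟨⟨⟨⟨h1, h2⟩, h3⟩, h4⟩, h5⟩, h6⟩, h7⟩, h9⟩ := h
        obtain ⟨q', r', hq', hok', hfq', hcok'⟩ := ih (f ++ pvMid v ++ t) t h9 h6 h7
        refine ⟨"", .blk false u v w1 w2 (t ++ q') :: r', by simp [pvChunkM, hq'], by simpa using hs,
          by simpa using hf, ?_⟩
        simp only [pvCOK2, Bool.and_eq_true]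
        refine ⟨⟨⟨h1, h2⟩, ?_⟩, ?_⟩
        · simpa [String.append_assoc] using hfq'
        · simpa [String.append_assoc] using hcok'

lemma pv_merge_chunkM : ∀ (cs : List PvChunk) (pre acc : String) (a : String) (r : List PvChunk),
    pvChunkM acc cs = .plain a :: r → pvMerge (pre ++ a) r = pvMerge (pre ++ acc) cs := by
  intro cs
  induction cs with
  | nil =>
    intro pre acc a r h
    simp only [pvChunkM, List.cons.injEq] at h
    obtain ⟨h1, h2⟩ := h
    obtain rfl : acc = a := by simpa using h1
    subst h2
    simp [pvMerge]
  | cons c cs ih =>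
    intro pre acc a r h
    cases c with
    | plain s =>
      simp only [pvChunkM, List.cons.injEq] at h
      obtain ⟨h1, h2⟩ := h
      obtain rfl : acc = a := by simpa using h1
      subst h2
      obtain ⟨q, r', hq⟩ := pv_chunkM_head cs s
      rw [hq]
      simp only [pvMerge]
      have := ih "" s (s ++ q) r' (by rw [hq])
      rw [pv_empty_append, pv_empty_append] at this
      rw [this]
    | blk m u v w1 w2 t =>
      cases m with
      | true =>
        simp only [pvChunkM] at h
        have := ih pre (acc ++ pvMid v ++ t) a r h
        rw [this]
        simp [pvMerge, String.append_assoc]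
      | false =>
        obtain ⟨q, r2, hq⟩ := pv_chunkM_head cs t
        rw [pvChunkM.eq_def] at h
        simp only [hq] at h
        rw [List.cons.injEq] at h
        obtain ⟨h1, h2⟩ := h
        obtain rfl : acc = a := by simpa using h1
        subst h2
        simp only [pvMerge]
        exact ih (pre ++ acc ++ pvMid v) t (t ++ q) r2 (by rw [hq])

-- ---- counting / fuel bounds ----
lemma pv_cntM_le (cs : List PvChunk) : pvCntM cs ≤ (pvFlats cs).length := by
  induction cs with
  | nil => simp [pvCntM, pvFlats]
  | cons c cs ih =>
    cases c with
    | plain s => simp only [pvCntM, pvFlats, List.map_cons, List.flatten_cons, pvFlat]; simp [pvFlats] at ih ⊢; omega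
    | blk m u v w1 w2 t =>
      cases m <;>
        (simp only [pvCntM, pvFlats, List.map_cons, List.flatten_cons, pvFlat];
         simp [pvFlats] at ih ⊢; omega)

lemma pv_cntS_le (cs : List PvChunk) : pvCntS cs ≤ (pvFlats cs).length := by
  induction cs with
  | nil => simp [pvCntS, pvFlats]
  | cons c cs ih =>
    cases c with
    | plain s => simp only [pvCntS, pvFlats, List.map_cons, List.flatten_cons, pvFlat]; simp [pvFlats] at ih ⊢; omega
    | blk m u v w1 w2 t =>
      cases m <;>
        (simp only [pvCntS, pvFlats, List.map_cons, List.flatten_cons, pvFlat];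
         simp [pvFlats] at ih ⊢; omega)

lemma pv_len_chunkM : ∀ (cs : List PvChunk) (acc : String),
    (pvFlats (pvChunkM acc cs)).length ≤ (pvFlats cs).length + 1 := by
  intro cs
  induction cs with
  | nil => intro acc; simp [pvChunkM, pvFlats, pvFlat]
  | cons c cs ih =>
    intro acc
    cases c with
    | plain s =>
      have := ih s
      simp only [pvChunkM, pvFlats, List.map_cons, List.flatten_cons, pvFlat] at *
      simp at this ⊢
      omega
    | blk m u v w1 w2 t =>
      cases m with
      | true =>
        have := ih (acc ++ pvMid v ++ t)
        simp only [pvChunkM, pvFlats, List.map_cons, List.flatten_cons, pvFlat] at *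
        simp at this ⊢
        omega
      | false =>
        obtain ⟨q, r, hq⟩ := pv_chunkM_head cs t
        have := ih t
        rw [hq] at this
        simp only [pvChunkM, hq, pvFlats, List.map_cons, List.flatten_cons, pvFlat] at *
        simp at this ⊢
        omega

lemma pv_not_mem_append {tag : String} {P l : List String}
    (hP : tag ∉ P) (hl : tag ∉ l) : tag ∉ P ++ l := by
  simp only [List.mem_append]
  rintro (h | h)
  · exact hP h
  · exact hl h

-- ---- A side: the two loops ----
lemma pv_loop_step (tag : String) (n : Nat) (x : List String) (y : Nat)
    (hmem : tag ∈ x) (hidx : PySem.List.index? x tag = some y) :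
    pvLoop tag (n + 1) x = pvLoop tag n (pvStep x (y : Int)) := by
  simp only [pvLoop]
  rw [if_pos hmem, hidx]

lemma pv_loopM : ∀ (cs : List PvChunk) (P : List String) (f s : String) (n : Nat),
    pvCOK (some (f, s)) cs = true → pvOk s = true → "Mismatch" ∉ P → pvCntM cs ≤ n →
    pvLoop "Mismatch" n (P ++ s :: pvFlats cs) = P ++ pvFlats (pvChunkM s cs) := by
  intro cs
  induction cs with
  | nil =>
    intro P f s n h hs hP hn
    have hnm : "Mismatch" ∉ P ++ s :: pvFlats ([] : List PvChunk) := by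
      refine pv_not_mem_append hP ?_
      simp only [pvFlats, List.map_nil, List.flatten_nil, List.mem_cons, List.not_mem_nil, or_false]
      exact fun hh => pv_ok_neM hs hh.symm
    rw [pv_loop_not_mem _ _ _ hnm]
    simp [pvChunkM, pvFlats, pvFlat]
  | cons c cs ih =>
    intro P f s n h hs hP hn
    cases c with
    | plain str =>
      simp only [pvCOK, Bool.and_eq_true] at h
      obtain ⟨h1, h2⟩ := h
      have hfl : pvFlats (.plain str :: cs) = str :: pvFlats cs := by simp [pvFlats, pvFlat]
      rw [hfl]
      have hP' : "Mismatch" ∉ P ++ [s] := by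
        refine pv_not_mem_append hP ?_
        simp only [List.mem_cons, List.not_mem_nil, or_false]
        exact fun hh => pv_ok_neM hs hh.symm
      have := ih (P ++ [s]) str str n h2 h1 hP' (by simpa [pvCntM] using hn)
      simp only [List.append_assoc, List.cons_append, List.nil_append] at this
      rw [this]
      simp [pvChunkM, pvFlats, pvFlat]
    | blk m u v w1 w2 t =>
      cases m with
      | true =>
        simp only [pvCOK, Bool.and_eq_true] at h
        obtain ⟨⟨⟨⟨⟨⟨⟨⟨h1, h2⟩, h3⟩, h4⟩, h5⟩, h6⟩, h7⟩, h8⟩, h9⟩ := h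
        have hfl : pvFlats (.blk true u v w1 w2 t :: cs)
            = u :: v :: "Mismatch" :: w1 :: w2 :: t :: pvFlats cs := by simp [pvFlats, pvFlat]
        rw [hfl]
        obtain ⟨n', rfl⟩ : ∃ n', n = n' + 1 := by
          simp only [pvCntM] at hn
          exact ⟨n - 1, by omega⟩
        have hmem : "Mismatch" ∈ P ++ s :: u :: v :: "Mismatch" :: w1 :: w2 :: t :: pvFlats cs := by
          simp
        have hidx := pv_index_eq P s u v "Mismatch" (w1 :: w2 :: t :: pvFlats cs) hP
          (pv_ok_neM hs) (pv_ok_neM h1) (pv_ok_neM h2)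
        rw [pv_loop_step _ _ _ _ hmem hidx]
        have hcast : ((P.length + 3 : Nat) : Int) = (P.length : Int) + 3 := by push_cast; ring
        rw [hcast, pv_step_eq]
        have := ih P (f ++ pvMid v ++ t) (s ++ pvMid v ++ t) n' h9 h8 hP
          (by simp only [pvCntM] at hn; omega)
        rw [this]
        simp [pvChunkM]
      | false =>
        simp only [pvCOK, Bool.and_eq_true] at h
        obtain ⟨⟨⟨⟨⟨⟨⟨h1, h2⟩, h3⟩, h4⟩, h5⟩, h6⟩, h7⟩, h9⟩ := h
        have hfl : pvFlats (.blk false u v w1 w2 t :: cs)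
            = u :: v :: "Sub" :: w1 :: w2 :: t :: pvFlats cs := by simp [pvFlats, pvFlat]
        rw [hfl]
        have hP' : "Mismatch" ∉ P ++ [s, u, v, "Sub", w1, w2] := by
          refine pv_not_mem_append hP ?_
          simp only [List.mem_cons, List.not_mem_nil, or_false]
          rintro (hh | hh | hh | hh | hh | hh)
          · exact pv_ok_neM hs hh.symm
          · exact pv_ok_neM h1 hh.symm
          · exact pv_ok_neM h2 hh.symm
          · exact absurd hh (by decide)
          · exact pv_ok_neM h4 hh.symm
          · exact pv_ok_neM h5 hh.symm
        have := ih (P ++ [s, u, v, "Sub", w1, w2]) (f ++ pvMid v ++ t) t n h9 h6 hP'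
          (by simpa [pvCntM] using hn)
        simp only [List.append_assoc, List.cons_append, List.nil_append] at this
        rw [this]
        obtain ⟨q, r, hq⟩ := pv_chunkM_head cs t
        rw [hq]
        conv_rhs => rw [pvChunkM.eq_def]
        simp [hq, pvFlats, pvFlat]

lemma pv_loopS : ∀ (cs : List PvChunk) (P : List String) (a : String) (n : Nat),
    pvCOK2 a cs = true → pvOk a = true → "Sub" ∉ P → pvCntS cs ≤ n →
    pvLoop "Sub" n (P ++ a :: pvFlats cs) = P ++ pvMerge a cs := by
  intro cs
  induction cs with
  | nil =>
    intro P a n h ha hP hn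
    have hnm : "Sub" ∉ P ++ a :: pvFlats ([] : List PvChunk) := by
      refine pv_not_mem_append hP ?_
      simp only [pvFlats, List.map_nil, List.flatten_nil, List.mem_cons, List.not_mem_nil, or_false]
      exact fun hh => pv_ok_neS ha hh.symm
    rw [pv_loop_not_mem _ _ _ hnm]
    simp [pvMerge, pvFlats]
  | cons c cs ih =>
    intro P a n h ha hP hn
    cases c with
    | plain str =>
      simp only [pvCOK2, Bool.and_eq_true] at h
      obtain ⟨h1, h2⟩ := h
      have hfl : pvFlats (.plain str :: cs) = str :: pvFlats cs := by simp [pvFlats, pvFlat]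
      rw [hfl]
      have hP' : "Sub" ∉ P ++ [a] := by
        refine pv_not_mem_append hP ?_
        simp only [List.mem_cons, List.not_mem_nil, or_false]
        exact fun hh => pv_ok_neS ha hh.symm
      have := ih (P ++ [a]) str n h2 h1 hP' (by simpa [pvCntS] using hn)
      simp only [List.append_assoc, List.cons_append, List.nil_append] at this
      rw [this]
      simp [pvMerge]
    | blk m u v w1 w2 t =>
      cases m with
      | true => simp [pvCOK2] at h
      | false =>
        simp only [pvCOK2, Bool.and_eq_true] at h
        obtain ⟨⟨⟨h1, h2⟩, h7⟩, h9⟩ := h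
        have hfl : pvFlats (.blk false u v w1 w2 t :: cs)
            = u :: v :: "Sub" :: w1 :: w2 :: t :: pvFlats cs := by simp [pvFlats, pvFlat]
        rw [hfl]
        obtain ⟨n', rfl⟩ : ∃ n', n = n' + 1 := by
          simp only [pvCntS] at hn
          exact ⟨n - 1, by omega⟩
        have hmem : "Sub" ∈ P ++ a :: u :: v :: "Sub" :: w1 :: w2 :: t :: pvFlats cs := by
          simp
        have hidx := pv_index_eq P a u v "Sub" (w1 :: w2 :: t :: pvFlats cs) hP
          (pv_ok_neS ha) (pv_ok_neS h1) (pv_ok_neS h2)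
        rw [pv_loop_step _ _ _ _ hmem hidx]
        have hcast : ((P.length + 3 : Nat) : Int) = (P.length : Int) + 3 := by push_cast; ring
        rw [hcast, pv_step_eq]
        have := ih P (a ++ pvMid v ++ t) n' h9 h7 hP (by simp only [pvCntS] at hn; omega)
        rw [this]
        simp [pvMerge]

-- ---- assembly ----
lemma pv_alt_merge (x : List String) (s : String) (cs : List PvChunk)
    (hx : x = s :: pvFlats cs) (h1 : pvOk s = true) (h2 : pvCOK (some (s, s)) cs = true) :
    ContractX_alt x = pvMerge s cs := by
  unfold ContractX_alt
  rw [hx, pvGo_plain _ _ _ (pv_ok_false h1), pv_go_merge cs s s [] h2 h1]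
  simp

-- ===== VERDICT (by name: the statement is the Claim_ definition above) =====
theorem ContractX_spec : Claim_equal_ContractX := by
  intro x _hdom hpre
  show ContractX x = ContractX_alt x
  obtain ⟨hcok, hflat⟩ := pv_parse_ok x none hpre
  cases hcs : pvParse x with
  | nil =>
    rw [hcs] at hflat
    simp only [pvFlats, List.map_nil, List.flatten_nil] at hflat
    subst hflat
    rfl
  | cons c cs =>
    rw [hcs] at hflat hcok
    cases c with
    | blk m u v w1 w2 t => simp [pvCOK] at hcok
    | plain s =>
      simp only [pvCOK, Bool.and_eq_true] at hcok
      obtain ⟨h1, h2⟩ := hcok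
      have hx : x = s :: pvFlats cs := by rw [hflat]; simp [pvFlats, pvFlat]
      have hlen : x.length = 1 + (pvFlats cs).length := by rw [hx]; simp; omega
      have hM := pv_loopM cs [] s s x.length h2 h1 (by simp)
        (le_trans (pv_cntM_le cs) (by omega))
      simp only [List.nil_append] at hM
      rw [← hx] at hM
      obtain ⟨q, r, hq, hok, hfq, hcok2⟩ := pv_chunkM_struct cs s s h2 h1 h1
      have hflm : pvFlats (pvChunkM s cs) = (s ++ q) :: pvFlats r := by
        rw [hq]; simp [pvFlats, pvFlat]
      have hcnt2 : pvCntS r ≤ x.length := by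
        have hc := pv_cntS_le r
        have hl2 := pv_len_chunkM cs s
        have hl : (pvFlats (pvChunkM s cs)).length = 1 + (pvFlats r).length := by
          rw [hflm]; simp; omega
        omega
      have hS := pv_loopS r [] (s ++ q) x.length hcok2 hok (by simp) hcnt2
      simp only [List.nil_append] at hS
      have hcomp : pvMerge (s ++ q) r = pvMerge s cs := by
        have h := pv_merge_chunkM cs "" s (s ++ q) r hq
        rwa [pv_empty_append, pv_empty_append] at h
      unfold ContractX
      rw [hM, hflm, hS, pv_alt_merge x s cs hx h1 h2, hcomp]
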